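-- pv_equiv track=rewrite | github.com/infrast-ques/nechaev_python_api | src/learning/hexlet/declare_programming.py | odds_from_odds
-- ===== SOURCE A (Python) =====
-- def odds_from_odds(nums_list):
--     return [
--         list(
--             map(
--                 lambda p: p[1],
--                 filter(
--                     lambda num_pair: (num_pair[0] + 1) % 2 != 0, enumerate(nums)
--                 )
--             )
--         )
--         for i, nums in enumerate(nums_list) if (i + 1) % 2 != 0
--     ]
-- ===== SOURCE B (Python) =====
-- def odds_from_odds(nums_list):
--     return [nums[::2] for nums in nums_list[::2]]
-- ===== Notes on version B (the rewrite author's own statement) =====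
-- stated objective: idiomatic
-- what changed: Replaces the nested enumerate/filter/map parity tests with step-2 slices that stride directly to every other sublist and element.
import Mathlib
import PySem

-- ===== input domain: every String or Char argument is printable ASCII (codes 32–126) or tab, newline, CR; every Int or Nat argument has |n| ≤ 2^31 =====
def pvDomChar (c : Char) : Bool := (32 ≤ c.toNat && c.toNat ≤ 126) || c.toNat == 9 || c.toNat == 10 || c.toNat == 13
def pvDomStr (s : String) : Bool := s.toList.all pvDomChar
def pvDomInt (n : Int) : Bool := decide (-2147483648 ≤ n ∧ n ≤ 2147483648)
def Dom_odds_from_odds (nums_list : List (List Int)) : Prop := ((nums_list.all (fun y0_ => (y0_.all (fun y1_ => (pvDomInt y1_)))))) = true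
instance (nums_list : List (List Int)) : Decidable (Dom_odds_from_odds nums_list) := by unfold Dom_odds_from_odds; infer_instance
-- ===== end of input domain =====

-- B replaces the enumerate/filter parity tests with idiomatic step-2 slices; same cost, plainer code.

-- ===== PORT A =====
-- inner comprehension: list(map(lambda p: p[1], filter(lambda q: (q[0]+1)%2 != 0, enumerate(nums))))
def oddsInner (nums : List Int) : List Int :=
  ((PySem.List.enumerate nums 0).filter
    (fun num_pair => PySem.Int.mod (num_pair.1 + 1) 2 ≠ 0)).map (fun p => p.2)

def odds_from_odds (nums_list : List (List Int)) : List (List Int) :=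
  ((PySem.List.enumerate nums_list 0).filter
    (fun p => PySem.Int.mod (p.1 + 1) 2 ≠ 0)).map (fun p => oddsInner p.2)

-- ===== PORT B =====
-- xs[::2]; step 2 ≠ 0, so slice? always returns some — [] is unreachable
def stride2 (xs : List Int) : List Int :=
  (PySem.List.slice? xs none none 2).getD []

def odds_from_odds_alt (nums_list : List (List Int)) : List (List Int) :=
  (stride2O nums_list).map stride2
where stride2O (xs : List (List Int)) : List (List Int) :=
  (PySem.List.slice? xs none none 2).getD []

-- ===== PRECONDITION & SPEC =====
def Spec_odds_from_odds (nums_list : List (List Int)) (out : List (List Int)) : Prop := out = odds_from_odds_alt nums_list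
instance (nums_list : List (List Int)) (out : List (List Int)) : Decidable (Spec_odds_from_odds nums_list out) := by unfold Spec_odds_from_odds; infer_instance

-- ===== CLAIM (what is proved, stated in full; the proofs are below) =====
def Claim_equal_odds_from_odds : Prop := ∀ (nums_list : List (List Int)), Dom_odds_from_odds nums_list → Spec_odds_from_odds nums_list (odds_from_odds nums_list)

-- ===== LEMMAS AND PROOFS =====

-- every other element, taken structurally
def eo {α : Type} : List α → List α
  | [] => []
  | [x] => [x]
  | x :: _ :: t => x :: eo t

theorem filterMap_range_get {α : Type} (xs : List α) :
    (List.range ((xs.length + 1) / 2)).filterMap (fun k => xs[2 * k]?) = eo xs := by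
  induction xs using eo.induct with
  | case1 => simp [eo]
  | case2 x => simp [eo]
  | case3 x y t ih =>
    have hc : ((x :: y :: t).length + 1) / 2 = (t.length + 1) / 2 + 1 := by
      simp; omega
    rw [hc, List.range_succ_eq_map, List.filterMap_cons, List.filterMap_map]
    simp only [Function.comp]
    have : (fun k => (x :: y :: t)[2 * Nat.succ k]?) = (fun k => t[2 * k]?) := by
      funext k
      have h2 : 2 * Nat.succ k = (2 * k) + 2 := by omega
      simp [h2, List.getElem?_cons_succ]
    simp only [Nat.succ_eq_add_one] at this ⊢
    rw [show (fun k => (x :: y :: t)[2 * (k + 1)]?) = (fun k => t[2 * k]?) from this, ih]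
    simp [eo]

theorem slice2_eq_eo {α : Type} (xs : List α) :
    PySem.List.slice? xs none none 2 = some (eo xs) := by
  rw [PySem.List.slice?]
  simp only [PySem.List.sliceIndices]
  norm_num
  have hcount : (((xs.length : Int) + 1) / 2).toNat = (xs.length + 1) / 2 := by
    omega
  have harg : ∀ k : Nat, ((2 * (k : Int)).toNat) = 2 * k := by intro k; omega
  rw [show ((xs.length : Int) + 2 - 1) = ((xs.length : Int) + 1) by ring, hcount]
  simp only [harg]
  rw [show (if 0 < xs.length then (xs.length + 1) / 2 else 0) = (xs.length + 1) / 2 by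
        split_ifs <;> omega]
  rw [filterMap_range_get xs]

-- A's filtered enumeration, for both parities of the start index
theorem enum_filter_parity {α : Type} (xs : List α) : ∀ s : Int,
    (PySem.Int.mod (s + 1) 2 ≠ 0 →
      ((PySem.List.enumerate xs s).filter
        (fun p => PySem.Int.mod (p.1 + 1) 2 ≠ 0)).map (fun p => p.2) = eo xs) ∧
    (PySem.Int.mod (s + 1) 2 = 0 →
      ((PySem.List.enumerate xs s).filter
        (fun p => PySem.Int.mod (p.1 + 1) 2 ≠ 0)).map (fun p => p.2) = eo xs.tail) := by
  induction xs with
  | nil => intro s; simp [PySem.List.enumerate, eo]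
  | cons x t ih =>
    intro s
    have hmod : ∀ a : Int, PySem.Int.mod a 2 = a % 2 := by
      intro a; simp [PySem.Int.mod, Int.fmod_eq_emod]
    have halt : PySem.Int.mod (s + 1) 2 = 0 ↔ PySem.Int.mod (s + 1 + 1) 2 ≠ 0 := by
      simp only [hmod]; omega
    constructor
    · intro h
      rw [PySem.List.enumerate_cons]
      rw [List.filter_cons_of_pos (by simpa using h)]
      rcases t with _ | ⟨y, t'⟩
      · simp [PySem.List.enumerate, eo]
      · have h2 : PySem.Int.mod (s + 1 + 1) 2 = 0 := by
          simp only [hmod] at h ⊢; omega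
        have := (ih (s + 1)).2 h2
        simp only [List.map_cons, this, List.tail, eo]
    · intro h
      rw [PySem.List.enumerate_cons]
      rw [List.filter_cons_of_neg (by simpa using h)]
      have := (ih (s + 1)).1 (halt.mp h)
      rw [List.tail_cons]
      simpa using this

-- ===== VERDICT (by name: the statement is the Claim_ definition above) =====
theorem odds_from_odds_spec : Claim_equal_odds_from_odds := by
  intro nums_list _
  unfold Spec_odds_from_odds odds_from_odds odds_from_odds_alt odds_from_odds_alt.stride2O
  rw [slice2_eq_eo]
  have houter := (enum_filter_parity nums_list 0).1 (by decide)
  have hinner : ∀ nums : List Int, oddsInner nums = stride2 nums := by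
    intro nums
    unfold oddsInner stride2
    rw [slice2_eq_eo]
    exact (enum_filter_parity nums 0).1 (by decide)
  calc ((PySem.List.enumerate nums_list 0).filter
          (fun p => PySem.Int.mod (p.1 + 1) 2 ≠ 0)).map (fun p => oddsInner p.2)
      = (((PySem.List.enumerate nums_list 0).filter
          (fun p => PySem.Int.mod (p.1 + 1) 2 ≠ 0)).map (fun p => p.2)).map oddsInner := by
        rw [List.map_map]; rfl
    _ = (eo nums_list).map stride2 := by
        rw [houter]; exact List.map_congr_left (fun a _ => hinner a)
    _ = (Option.getD (some (eo nums_list)) []).map stride2 := rfl
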